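-- pv_equiv track=rewrite | github.com/SelmaniZayd/casino_python | modules/combinaison.py | check_full
-- ===== SOURCE A (Python) =====
-- def check_full(hand):
--     hand_values = [card.split('-')[0] for card in hand]
--     values_set = set(hand_values)
--     if(len(values_set) == 2):
--         counts = [hand_values.count(e) for e in values_set]
--         if sorted(counts) == [2, 3]:
--             return True
--     return False
-- ===== SOURCE B (Python) =====
-- def check_full(hand):
--     vs = sorted(card.split('-')[0] for card in hand)
--     if len(vs) != 5:
--         return False
--     return vs[0] == vs[1] and vs[3] == vs[4] and (vs[1] == vs[2] or vs[2] == vs[3]) and vs[0] != vs[4]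
-- ===== Notes on version B (the rewrite author's own statement) =====
-- stated objective: alternative
-- what changed: Replaces A's set-building and per-rank .count scans compared as sorted counts with a count-free algorithm: sort the rank list once and recognise a full house purely by positional equalities on the sorted 5-list (aabbb/aaabb pattern).
import Mathlib
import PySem

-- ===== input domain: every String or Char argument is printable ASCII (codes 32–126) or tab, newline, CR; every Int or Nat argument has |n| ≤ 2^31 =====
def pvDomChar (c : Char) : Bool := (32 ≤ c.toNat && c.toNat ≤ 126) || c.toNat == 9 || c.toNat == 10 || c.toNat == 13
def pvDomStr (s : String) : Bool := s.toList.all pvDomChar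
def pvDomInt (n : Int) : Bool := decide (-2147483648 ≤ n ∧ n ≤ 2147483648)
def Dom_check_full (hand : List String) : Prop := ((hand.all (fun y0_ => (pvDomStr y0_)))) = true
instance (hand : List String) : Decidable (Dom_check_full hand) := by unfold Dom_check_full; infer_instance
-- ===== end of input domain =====

-- B drops A's set + per-rank .count scans and sorted-counts comparison: it sorts the rank list once
-- and recognises a full house by positional equalities on the sorted 5-list (objective: alternative).


-- card.split('-')[0]; split with a non-empty separator always yields ≥ 1 piece, so [0] never raises
def pvRank0 (card : String) : String := ((PySem.Str.split? card "-").getD []).headD ""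

-- ===== PORT A =====
def check_full (hand : List String) : Bool :=
  let hand_values := hand.map pvRank0
  let values_set : PySem.Set String := PySem.Set.ofList hand_values
  if values_set.length = 2 then
    -- iterating the Python set only to feed sorted(counts) == [2,3]: order-independent
    let counts : List Int := values_set.map (fun e => (hand_values.count e : Int))
    if PySem.List.sorted counts (fun x => x) false = [2, 3] then true else false
  else false

-- ===== PORT B =====
def check_full_alt (hand : List String) : Bool :=
  let vs := PySem.List.sorted (hand.map pvRank0) (fun x => x) false
  if vs.length ≠ 5 then false
  else
    -- vs[0] … vs[4]: length is 5 in this branch, so every index is in range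
    (PySem.List.pyGetD vs 0 "" == PySem.List.pyGetD vs 1 "") &&
    (PySem.List.pyGetD vs 3 "" == PySem.List.pyGetD vs 4 "") &&
    ((PySem.List.pyGetD vs 1 "" == PySem.List.pyGetD vs 2 "") ||
     (PySem.List.pyGetD vs 2 "" == PySem.List.pyGetD vs 3 "")) &&
    (PySem.List.pyGetD vs 0 "" != PySem.List.pyGetD vs 4 "")

-- ===== PRECONDITION & SPEC =====
def Spec_check_full (hand : List String) (out : Bool) : Prop := out = check_full_alt hand
instance (hand : List String) (out : Bool) : Decidable (Spec_check_full hand out) := by unfold Spec_check_full; infer_instance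

-- ===== CLAIM (what is proved, stated in full; the proofs are below) =====
def Claim_equal_check_full : Prop := ∀ (hand : List String), Dom_check_full hand → Spec_check_full hand (check_full hand)

-- ===== LEMMAS AND PROOFS =====

-- sorting a two-element list is a single comparison
theorem pvSortedPair (c d : Int) :
    PySem.List.sorted [c, d] (fun x => x) false = if d < c then [d, c] else [c, d] := by
  by_cases h : d < c <;>
    simp [PySem.List.sorted_eq_foldl_insertBy, PySem.List.insertBy, h]

-- a nodup list whose members are exactly {x, y} (x ≠ y) is [x,y] or [y,x]
theorem pvNodupPair {α : Type} [DecidableEq α] (l : List α) (x y : α) (hxy : x ≠ y)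
    (hnd : l.Nodup) (hmem : ∀ z, z ∈ l ↔ z = x ∨ z = y) : l = [x, y] ∨ l = [y, x] := by
  match l with
  | [] => exact absurd ((hmem x).mpr (Or.inl rfl)) (by simp)
  | [p] =>
    have hx := (hmem x).mpr (Or.inl rfl)
    have hy := (hmem y).mpr (Or.inr rfl)
    simp at hx hy; exact absurd (hx.trans hy.symm) hxy
  | p :: q :: r =>
    have hp := (hmem p).mp (by simp)
    have hq := (hmem q).mp (by simp)
    have hpq : p ≠ q := by simp at hnd; tauto
    have hr : r = [] := by
      cases r with
      | nil => rfl
      | cons t _ =>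
        have ht := (hmem t).mp (by simp)
        simp at hnd
        rcases hp with rfl | rfl <;> rcases hq with rfl | rfl <;>
          rcases ht with rfl | rfl <;> tauto
    subst hr
    rcases hp with rfl | rfl <;> rcases hq with rfl | rfl <;> tauto

-- a list whose members are exactly {u, v} is a permutation of its two replicate blocks
theorem pvPermBlocks (vs : List String) (u v : String) (huv : u ≠ v)
    (hmem : ∀ z ∈ vs, z = u ∨ z = v) :
    vs.Perm (List.replicate (vs.count u) u ++ List.replicate (vs.count v) v) := by
  refine List.perm_iff_count.mpr fun z => ?_
  simp only [List.count_append, List.count_replicate]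
  rcases eq_or_ne z u with rfl | hzu
  · simp [huv.symm]
  · rcases eq_or_ne z v with rfl | hzv
    · simp [Ne.symm hzu]
    · have hz0 : vs.count z = 0 :=
        List.count_eq_zero.mpr fun hz => by rcases hmem z hz with rfl | rfl <;> simp_all
      simp [Ne.symm hzu, Ne.symm hzv, hz0]

-- counts 3 of u and 2 of v (and nothing else) force the sorted list into two blocks
theorem pvSortedBlocks (vs : List String) (u v : String) (huv : u ≠ v)
    (hmem : ∀ z ∈ vs, z = u ∨ z = v) (hu : vs.count u = 3) (hv : vs.count v = 2) :
    ∃ x y, x ≠ y ∧ (PySem.List.sorted vs (fun z => z) false = [x, x, x, y, y] ∨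
                    PySem.List.sorted vs (fun z => z) false = [x, x, y, y, y]) := by
  have hperm := pvPermBlocks vs u v huv hmem
  rw [hu, hv] at hperm
  by_cases hlt : u < v
  · refine ⟨u, v, huv, Or.inl ?_⟩
    apply PySem.List.sorted_id_eq_of_perm_of_pairwise _ _ hperm.symm
    have hle := String.le_iff_toList_le.mp (le_of_lt hlt)
    simp [List.pairwise_cons, String.le_iff_toList_le, hle]
  · have hlt' : v < u := lt_of_le_of_ne (le_of_not_gt hlt) huv.symm
    have hperm' : vs.Perm (List.replicate 2 v ++ List.replicate 3 u) :=
      hperm.trans List.perm_append_comm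
    refine ⟨v, u, huv.symm, Or.inr ?_⟩
    apply PySem.List.sorted_id_eq_of_perm_of_pairwise _ _ hperm'.symm
    have hle := String.le_iff_toList_le.mp (le_of_lt hlt')
    simp [List.pairwise_cons, String.le_iff_toList_le, hle]

-- from an {x,y} membership description and counts {2,3} back to A's set/count condition
theorem pvAside (vs : List String) (x y : String) (hxy : x ≠ y)
    (hmemv : ∀ z, z ∈ vs ↔ z = x ∨ z = y)
    (hc : vs.count x = 2 ∧ vs.count y = 3 ∨ vs.count x = 3 ∧ vs.count y = 2) :
    (PySem.Set.ofList vs).length = 2 ∧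
    PySem.List.sorted ((PySem.Set.ofList vs).map fun e => ((vs.count e : Int))) (fun x => x) false
      = [2, 3] := by
  have hnd : (PySem.Set.ofList vs).Nodup := PySem.Set.nodup_ofList vs
  have hmem : ∀ z, z ∈ PySem.Set.ofList vs ↔ z = x ∨ z = y :=
    fun z => (PySem.Set.mem_ofList vs z).trans (hmemv z)
  rcases pvNodupPair _ x y hxy hnd hmem with hs | hs <;> rw [hs] <;>
    rcases hc with ⟨h1, h2⟩ | ⟨h1, h2⟩ <;>
    simp only [List.map_cons, List.map_nil, h1, h2] <;>
    rw [pvSortedPair] <;> norm_num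

-- A returns true exactly on the set/count condition
theorem pvAchar (hand : List String) :
    check_full hand = true ↔
      ((PySem.Set.ofList (hand.map pvRank0)).length = 2 ∧
       PySem.List.sorted ((PySem.Set.ofList (hand.map pvRank0)).map
         fun e => (((hand.map pvRank0).count e : Int))) (fun x => x) false = [2, 3]) := by
  simp only [check_full]
  split_ifs with h1 h2 <;> simp_all

-- B's body, as a function of the already-sorted list
theorem pvBshape (a : List String) :
    (if a.length ≠ 5 then false
     else
       (PySem.List.pyGetD a 0 "" == PySem.List.pyGetD a 1 "") &&
       (PySem.List.pyGetD a 3 "" == PySem.List.pyGetD a 4 "") &&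
       ((PySem.List.pyGetD a 1 "" == PySem.List.pyGetD a 2 "") ||
        (PySem.List.pyGetD a 2 "" == PySem.List.pyGetD a 3 "")) &&
       (PySem.List.pyGetD a 0 "" != PySem.List.pyGetD a 4 "")) = true ↔
    ∃ x y, x ≠ y ∧ (a = [x, x, x, y, y] ∨ a = [x, x, y, y, y]) := by
  rcases a with _ | ⟨z1, _ | ⟨z2, _ | ⟨z3, _ | ⟨z4, _ | ⟨z5, _ | ⟨z6, t⟩⟩⟩⟩⟩⟩
  case nil => simp
  case cons.nil => simp
  case cons.cons.nil => simp
  case cons.cons.cons.nil => simp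
  case cons.cons.cons.cons.nil => simp
  case cons.cons.cons.cons.cons.cons => simp
  -- the length-5 case
  rw [if_neg (by simp)]
  have g0 : PySem.List.pyGetD [z1, z2, z3, z4, z5] 0 "" = z1 := rfl
  have g1 : PySem.List.pyGetD [z1, z2, z3, z4, z5] 1 "" = z2 := rfl
  have g2 : PySem.List.pyGetD [z1, z2, z3, z4, z5] 2 "" = z3 := rfl
  have g3 : PySem.List.pyGetD [z1, z2, z3, z4, z5] 3 "" = z4 := rfl
  have g4 : PySem.List.pyGetD [z1, z2, z3, z4, z5] 4 "" = z5 := rfl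
  rw [g0, g1, g2, g3, g4]
  constructor
  · intro hb
    simp only [Bool.and_eq_true, Bool.or_eq_true, beq_iff_eq, bne_iff_ne] at hb
    obtain ⟨⟨⟨h01, h34⟩, hmid⟩, h04⟩ := hb
    subst h01; subst h34
    rcases hmid with h12 | h23
    · subst h12; exact ⟨z1, z4, h04, Or.inl rfl⟩
    · subst h23; exact ⟨z1, z3, h04, Or.inr rfl⟩
  · rintro ⟨x, y, hxy, h | h⟩ <;>
      (injection h with e1 h; injection h with e2 h; injection h with e3 h;
       injection h with e4 h; injection h with e5 _;
       subst e1; subst e2; subst e3; subst e4; subst e5) <;>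
      simp [hxy]

-- B returns true exactly when the sorted rank list has one of the two block shapes
theorem pvBchar (hand : List String) :
    check_full_alt hand = true ↔
      ∃ x y, x ≠ y ∧
        (PySem.List.sorted (hand.map pvRank0) (fun x => x) false = [x, x, x, y, y] ∨
         PySem.List.sorted (hand.map pvRank0) (fun x => x) false = [x, x, y, y, y]) := by
  simp only [check_full_alt]
  exact pvBshape _

-- ===== VERDICT (by name: the statement is the Claim_ definition above) =====
theorem check_full_spec : Claim_equal_check_full := by
  intro hand _
  unfold Spec_check_full
  have key : check_full hand = true ↔ check_full_alt hand = true := by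
    rw [pvAchar, pvBchar]
    set vs := hand.map pvRank0 with hvs
    constructor
    · rintro ⟨h2, hsort⟩
      obtain ⟨u, v, hs⟩ := List.length_eq_two.mp h2
      have huv : u ≠ v := by
        have := PySem.Set.nodup_ofList vs
        rw [hs] at this; simp at this; exact this
      have hmem : ∀ z ∈ vs, z = u ∨ z = v := by
        intro z hz
        have : z ∈ PySem.Set.ofList vs := (PySem.Set.mem_ofList vs z).mpr hz
        rw [hs] at this; simpa using this
      rw [hs] at hsort
      simp only [List.map_cons, List.map_nil] at hsort
      rw [pvSortedPair] at hsort
      split_ifs at hsort <;> simp only [List.cons.injEq, and_true] at hsort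
      · -- count v = 2, count u = 3
        obtain ⟨e1, e2⟩ := hsort
        exact pvSortedBlocks vs u v huv hmem (by exact_mod_cast e2) (by exact_mod_cast e1)
      · -- count u = 2, count v = 3
        obtain ⟨e1, e2⟩ := hsort
        exact pvSortedBlocks vs v u huv.symm (fun z hz => (hmem z hz).symm)
          (by exact_mod_cast e2) (by exact_mod_cast e1)
    · rintro ⟨x, y, hxy, h | h⟩
      · have hperm : vs.Perm [x, x, x, y, y] := by
          have hp := PySem.List.sorted_perm vs (fun z => z) false
          rw [h] at hp; exact hp.symm
        refine pvAside vs x y hxy (fun z => (hperm.mem_iff).trans (by simp)) (Or.inr ⟨?_, ?_⟩)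
        · rw [hperm.count_eq x]; simp [Ne.symm hxy]
        · rw [hperm.count_eq y]; simp [hxy]
      · have hperm : vs.Perm [x, x, y, y, y] := by
          have hp := PySem.List.sorted_perm vs (fun z => z) false
          rw [h] at hp; exact hp.symm
        refine pvAside vs x y hxy (fun z => (hperm.mem_iff).trans (by simp)) (Or.inl ⟨?_, ?_⟩)
        · rw [hperm.count_eq x]; simp [Ne.symm hxy]
        · rw [hperm.count_eq y]; simp [hxy]
  cases h1 : check_full hand <;> cases h2 : check_full_alt hand <;> simp_all
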